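-- pv_equiv track=rewrite | github.com/himikheal/4CR3-Code | A4/Q2.py | DLP_base3
-- ===== SOURCE A (Python) =====
-- def DLP_base3(a, b, n, p):
--     x = 0
--     current = b
--     for k in range(n-1, -1, -1):
--         t = pow(current, pow(3, k), p)
--
--         # Try digit = 0, 1, 2
--         for d in range(3):
--             if t == pow(a, d * pow(3, k), p):
--                 x_k = d
--                 break
--
--         # Remove this digit from current
--         current = (current * pow(a, -d * pow(3, k), p)) % p
--
--         # Add digit to answer
--         x += d * pow(3, k)
--
--     return x
-- ===== SOURCE B (Python) =====
-- def DLP_base3(a, b, n, p):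
--     # Inverse-free variant: no maintained residue `current` and no negative-exponent
--     # pow; the k-th digit is found by testing b^(3^k) directly against
--     # a^((x+d)*3^k) = pow(a,3^k,p)^(x+d), where x is the exponent accumulated so far.
--     x = 0
--     for k in range(n - 1, -1, -1):
--         w = 3 ** k
--         ak = pow(a, w, p)
--         t = pow(b, w, p)
--         if t == pow(ak, x, p):
--             d = 0
--         elif t == pow(ak, x + 1, p):
--             d = 1
--         else:
--             d = 2
--         x += d * w
--     return x
-- ===== Notes on version B (the rewrite author's own statement) =====
-- stated objective: alternative
-- what changed: B eliminates A's maintained residue `current` and all negative-exponent pow() calls (no modular inverse anywhere): it keeps only the accumulated exponent x and finds each digit by testing b^(3^k) directly against pow(a,3^k,p)^(x+d), i.e. a^((x+d)*3^k), instead of A's scheme of dividing each found digit out of the residue via pow(a,-d*3^k,p) and comparing the reduced residue with a^(d*3^k).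
-- outside the precondition, e.g. on DLP_base3(2, 1, 1, 4): A returns 0, B returns 0
import Mathlib
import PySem

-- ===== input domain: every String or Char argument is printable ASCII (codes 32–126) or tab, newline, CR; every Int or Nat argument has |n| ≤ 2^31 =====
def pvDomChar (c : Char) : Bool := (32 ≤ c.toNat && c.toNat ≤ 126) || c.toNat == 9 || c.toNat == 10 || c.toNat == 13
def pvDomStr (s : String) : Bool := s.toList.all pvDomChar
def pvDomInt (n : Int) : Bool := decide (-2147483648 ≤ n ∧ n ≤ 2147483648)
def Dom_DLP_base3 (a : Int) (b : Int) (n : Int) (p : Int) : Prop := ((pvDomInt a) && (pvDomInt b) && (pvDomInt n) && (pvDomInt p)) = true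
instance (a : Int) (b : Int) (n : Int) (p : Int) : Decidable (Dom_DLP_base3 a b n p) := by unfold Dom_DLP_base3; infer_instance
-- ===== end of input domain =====

-- B is inverse-free: it never maintains A's reduced residue `current` and computes no
-- modular inverse; each digit is found by comparing b^(3^k) with a^((x+d)·3^k), where x
-- is the exponent accumulated so far (objective: alternative, same asymptotic cost).

-- ===== PORT A =====
-- shared model of Python's builtin three-argument pow: pow(x, -1, p) (x invertible mod p)
def pymodinv (x : Int) (p : Int) : Int := PySem.Int.mod (Int.gcdA x p) p
-- binary modular exponentiation, as CPython's pow(b, e, p) computes it (e ≥ 0)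
def modpow (p : Int) (b : Int) (e : Nat) : Int :=
  if h : e = 0 then PySem.Int.mod 1 p
  else
    let r := modpow p (PySem.Int.mod (b * b) p) (e / 2)
    if e % 2 = 1 then PySem.Int.mod (r * b) p else r
termination_by e
decreasing_by exact Nat.div_lt_self (Nat.pos_of_ne_zero h) (by norm_num)

-- pow(b, e, p); for e < 0 Python inverts b mod p first (exact on gcd(b,p)=1, p ≠ 0)
def pypowmod (b : Int) (e : Int) (p : Int) : Int :=
  if e < 0 then modpow p (pymodinv b p) (-e).toNat
  else modpow p b e.toNat

-- loop body of A: t, the inner digit loop (break/leftover d compiles to the if-chain: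
-- d = 2 both when the d = 2 test matches and when no test matches), current update, x update
def dlpStep (a : Int) (p : Int) (s : Int × Int) (k : Int) : Int × Int :=
  let pk : Int := 3 ^ k.toNat
  let t := pypowmod s.2 pk p
  let d : Int := if t = pypowmod a (0 * pk) p then 0
                 else if t = pypowmod a (1 * pk) p then 1 else 2
  (s.1 + d * pk, PySem.Int.mod (s.2 * pypowmod a (-(d * pk)) p) p)

def DLP_base3 (a : Int) (b : Int) (n : Int) (p : Int) : Int :=
  ((PySem.List.pyRange (n - 1) (-1) (-1)).foldl (dlpStep a p) (0, b)).1

-- ===== PORT B =====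
-- the k-loop of Source B, k = m-1 down to 0, state x (no residue is maintained)
def altLoop (a : Int) (b : Int) (p : Int) : Nat → Int → Int
  | 0, x => x
  | (m+1), x =>
      let w : Int := 3 ^ m
      let ak := pypowmod a w p
      let t := pypowmod b w p
      let d : Int := if t = pypowmod ak x p then 0
                     else if t = pypowmod ak (x + 1) p then 1 else 2
      altLoop a b p m (x + d * w)

def DLP_base3_alt (a : Int) (b : Int) (n : Int) (p : Int) : Int :=
  altLoop a b p n.toNat 0

-- ===== PRECONDITION & SPEC =====
-- Pre_ excludes p = 0 with n > 0 (pow() raises ValueError) and gcd(a,p) ≠ 1 with n > 0, where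
-- Python's pow(a, -d*3^k, p) raises ValueError on the first nonzero digit; a few such
-- non-coprime inputs happen to have all digits zero, never invert, and return (B returns
-- the same value there).
def Pre_DLP_base3 (a : Int) (b : Int) (n : Int) (p : Int) : Prop :=
  n ≤ 0 ∨ (p ≠ 0 ∧ Int.gcd a p = 1)
instance (a : Int) (b : Int) (n : Int) (p : Int) : Decidable (Pre_DLP_base3 a b n p) := by
  unfold Pre_DLP_base3; infer_instance

def pvWitness_DLP_base3 : Int × Int × Int × Int := (2, 4, 3, 5)

def Spec_DLP_base3 (a : Int) (b : Int) (n : Int) (p : Int) (out : Int) : Prop := out = DLP_base3_alt a b n p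
instance (a : Int) (b : Int) (n : Int) (p : Int) (out : Int) : Decidable (Spec_DLP_base3 a b n p out) := by unfold Spec_DLP_base3; infer_instance

-- ===== CLAIM (what is proved, stated in full; the proofs are below) =====
def Claim_equal_DLP_base3 : Prop := ∀ (a : Int) (b : Int) (n : Int) (p : Int), Dom_DLP_base3 a b n p → Pre_DLP_base3 a b n p → Spec_DLP_base3 a b n p (DLP_base3 a b n p)

-- ===== LEMMAS AND PROOFS =====

theorem pymod_modeq (x p : Int) : PySem.Int.mod x p ≡ x [ZMOD p] := by
  rw [Int.modEq_iff_dvd]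
  exact ⟨PySem.Int.floordiv x p, by
    have := PySem.Int.floordiv_mul_add_mod x p
    linarith [mul_comm (PySem.Int.floordiv x p) p]⟩

theorem pymod_eq_of_modeq {p : Int} (hp : p ≠ 0) {x y : Int} (h : x ≡ y [ZMOD p]) :
    PySem.Int.mod x p = PySem.Int.mod y p := by
  have hme : PySem.Int.mod x p ≡ PySem.Int.mod y p [ZMOD p] :=
    (pymod_modeq x p).trans (h.trans (pymod_modeq y p).symm)
  have hd : p ∣ (PySem.Int.mod y p - PySem.Int.mod x p) := Int.modEq_iff_dvd.mp hme
  have hd' : |p| ∣ (PySem.Int.mod y p - PySem.Int.mod x p) := (abs_dvd _ _).mpr hd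
  have habs : |PySem.Int.mod y p - PySem.Int.mod x p| < |p| := by
    rcases lt_or_gt_of_ne hp with hneg | hpos
    · have b1 := PySem.Int.mod_neg_bounds x (b := p) hneg
      have b2 := PySem.Int.mod_neg_bounds y (b := p) hneg
      rw [abs_of_neg hneg, abs_lt]; omega
    · have b1 := PySem.Int.mod_nonneg x (b := p) hpos
      have b2 := PySem.Int.mod_nonneg y (b := p) hpos
      have c1 := PySem.Int.mod_lt x (b := p) hpos
      have c2 := PySem.Int.mod_lt y (b := p) hpos
      rw [abs_of_pos hpos, abs_lt]; omega
  have := Int.eq_zero_of_abs_lt_dvd hd' habs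
  omega

theorem pymod_eq_iff {p : Int} (hp : p ≠ 0) (x y : Int) :
    PySem.Int.mod x p = PySem.Int.mod y p ↔ x ≡ y [ZMOD p] := by
  constructor
  · intro h
    calc x ≡ PySem.Int.mod x p [ZMOD p] := (pymod_modeq x p).symm
      _ = PySem.Int.mod y p := h
      _ ≡ y [ZMOD p] := pymod_modeq y p
  · exact pymod_eq_of_modeq hp

theorem modinv_prop {x p : Int} (hg : Int.gcd x p = 1) : x * pymodinv x p ≡ 1 [ZMOD p] := by
  have hab := Int.gcd_eq_gcd_ab x p
  rw [hg] at hab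
  have h1 : x * Int.gcdA x p ≡ 1 [ZMOD p] := by
    rw [Int.modEq_iff_dvd]
    exact ⟨Int.gcdB x p, by push_cast at hab; linarith⟩
  calc x * pymodinv x p ≡ x * Int.gcdA x p [ZMOD p] := (pymod_modeq _ p).mul_left x
    _ ≡ 1 [ZMOD p] := h1

-- cancellation of an invertible power of a
theorem modeq_cancel_pow {a p : Int} (hg : Int.gcd a p = 1) (E : Nat) {x y : Int}
    (h : x * a ^ E ≡ y * a ^ E [ZMOD p]) : x ≡ y [ZMOD p] := by
  have hinv : (a * pymodinv a p) ^ E ≡ 1 [ZMOD p] := by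
    calc (a * pymodinv a p) ^ E ≡ 1 ^ E [ZMOD p] := (modinv_prop hg).pow _
      _ = 1 := one_pow _
  calc x = x * 1 := by ring
    _ ≡ x * (a * pymodinv a p) ^ E [ZMOD p] := hinv.symm.mul_left x
    _ = (x * a ^ E) * (pymodinv a p) ^ E := by rw [mul_pow]; ring
    _ ≡ (y * a ^ E) * (pymodinv a p) ^ E [ZMOD p] := h.mul_right _
    _ = y * (a * pymodinv a p) ^ E := by rw [mul_pow]; ring
    _ ≡ y * 1 [ZMOD p] := hinv.mul_left y
    _ = y := by ring

theorem toNat_three_pow (m : Nat) : ((3 : Int) ^ m).toNat = 3 ^ m := by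
  have h : ((3:Int) ^ m) = ((3 ^ m : Nat) : Int) := by push_cast; ring
  rw [h, Int.toNat_natCast]

theorem modpow_eq {p : Int} (hp : p ≠ 0) :
    ∀ (e : Nat) (b : Int), modpow p b e = PySem.Int.mod (b ^ e) p := by
  intro e
  induction e using Nat.strong_induction_on with
  | _ e ih =>
    intro b
    rw [modpow]
    by_cases h0 : e = 0
    · rw [dif_pos h0, h0, pow_zero]
    · rw [dif_neg h0]
      have hdiv : e / 2 < e := Nat.div_lt_self (Nat.pos_of_ne_zero h0) (by norm_num)
      have hr : modpow p (PySem.Int.mod (b * b) p) (e / 2)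
          = PySem.Int.mod (b ^ (2 * (e / 2))) p := by
        rw [ih _ hdiv]
        apply pymod_eq_of_modeq hp
        calc PySem.Int.mod (b * b) p ^ (e / 2)
              ≡ (b * b) ^ (e / 2) [ZMOD p] := (pymod_modeq _ p).pow _
          _ = b ^ (2 * (e / 2)) := by rw [pow_mul]; ring
      by_cases h1 : e % 2 = 1
      · rw [if_pos h1, hr]
        apply pymod_eq_of_modeq hp
        calc PySem.Int.mod (b ^ (2 * (e / 2))) p * b
              ≡ b ^ (2 * (e / 2)) * b [ZMOD p] := (pymod_modeq _ p).mul_right b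
          _ = b ^ (2 * (e / 2) + 1) := by rw [pow_succ]
          _ = b ^ e := by congr 1; omega
      · rw [if_neg h1, hr]
        congr 1
        congr 1
        omega

theorem pypowmod_eval {p : Int} (hp : p ≠ 0) (b e : Int) :
    pypowmod b e p = if e < 0 then PySem.Int.mod ((pymodinv b p) ^ (-e).toNat) p
                     else PySem.Int.mod (b ^ e.toNat) p := by
  simp only [pypowmod]
  split_ifs <;> rw [modpow_eq hp]

-- the two digit tests correspond: B tests b0^(3^m) against a^((X+d')·3^m),
-- A tests current^(3^m) against a^(d'·3^m), linked by current · a^X ≡ b0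
theorem step_test {a p : Int} (hp : p ≠ 0) (hg : Int.gcd a p = 1) (m X : Nat)
    {ca b0 : Int} (hinv : ca * a ^ X ≡ b0 [ZMOD p]) (d' : Nat) :
    (PySem.Int.mod (b0 ^ 3 ^ m) p
        = PySem.Int.mod ((PySem.Int.mod (a ^ 3 ^ m) p) ^ (X + d')) p)
      ↔ (PySem.Int.mod (ca ^ 3 ^ m) p = PySem.Int.mod (a ^ (d' * 3 ^ m)) p) := by
  rw [pymod_eq_iff hp, pymod_eq_iff hp]
  have h1 : (PySem.Int.mod (a ^ 3 ^ m) p) ^ (X + d')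
      ≡ a ^ (3 ^ m * X) * a ^ (d' * 3 ^ m) [ZMOD p] := by
    calc (PySem.Int.mod (a ^ 3 ^ m) p) ^ (X + d')
          ≡ (a ^ 3 ^ m) ^ (X + d') [ZMOD p] := (pymod_modeq _ p).pow _
      _ = a ^ (3 ^ m * X) * a ^ (d' * 3 ^ m) := by
          rw [← pow_mul, ← pow_add]
          congr 1
          ring
  have h2 : b0 ^ 3 ^ m ≡ ca ^ 3 ^ m * a ^ (3 ^ m * X) [ZMOD p] := by
    calc b0 ^ 3 ^ m ≡ (ca * a ^ X) ^ 3 ^ m [ZMOD p] := (hinv.symm).pow _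
      _ = ca ^ 3 ^ m * a ^ (3 ^ m * X) := by rw [mul_pow, ← pow_mul, Nat.mul_comm X]
  constructor
  · intro h
    have : ca ^ 3 ^ m * a ^ (3 ^ m * X) ≡ a ^ (d' * 3 ^ m) * a ^ (3 ^ m * X) [ZMOD p] := by
      calc ca ^ 3 ^ m * a ^ (3 ^ m * X) ≡ b0 ^ 3 ^ m [ZMOD p] := h2.symm
        _ ≡ (PySem.Int.mod (a ^ 3 ^ m) p) ^ (X + d') [ZMOD p] := h
        _ ≡ a ^ (3 ^ m * X) * a ^ (d' * 3 ^ m) [ZMOD p] := h1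
        _ = a ^ (d' * 3 ^ m) * a ^ (3 ^ m * X) := by ring
    exact modeq_cancel_pow hg _ this
  · intro h
    calc b0 ^ 3 ^ m ≡ ca ^ 3 ^ m * a ^ (3 ^ m * X) [ZMOD p] := h2
      _ ≡ a ^ (d' * 3 ^ m) * a ^ (3 ^ m * X) [ZMOD p] := h.mul_right _
      _ = a ^ (3 ^ m * X) * a ^ (d' * 3 ^ m) := by ring
      _ ≡ (PySem.Int.mod (a ^ 3 ^ m) p) ^ (X + d') [ZMOD p] := h1.symm

theorem update_inv {a p : Int} (hg : Int.gcd a p = 1) (m X D : Nat)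
    {ca b0 : Int} (hc : ca * a ^ X ≡ b0 [ZMOD p]) :
    PySem.Int.mod (ca * PySem.Int.mod ((pymodinv a p) ^ (D * 3 ^ m)) p) p * a ^ (X + D * 3 ^ m)
      ≡ b0 [ZMOD p] := by
  have hone : (a * pymodinv a p) ^ (D * 3 ^ m) ≡ 1 [ZMOD p] := by
    calc (a * pymodinv a p) ^ (D * 3 ^ m) ≡ 1 ^ (D * 3 ^ m) [ZMOD p] := (modinv_prop hg).pow _
      _ = 1 := one_pow _
  calc PySem.Int.mod (ca * PySem.Int.mod ((pymodinv a p) ^ (D * 3 ^ m)) p) p * a ^ (X + D * 3 ^ m)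
        ≡ (ca * PySem.Int.mod ((pymodinv a p) ^ (D * 3 ^ m)) p) * a ^ (X + D * 3 ^ m) [ZMOD p] :=
          (pymod_modeq _ p).mul_right _
    _ ≡ (ca * (pymodinv a p) ^ (D * 3 ^ m)) * a ^ (X + D * 3 ^ m) [ZMOD p] :=
          ((pymod_modeq _ p).mul_left ca).mul_right _
    _ = (ca * a ^ X) * (a * pymodinv a p) ^ (D * 3 ^ m) := by
          rw [mul_pow, pow_add]; ring
    _ ≡ b0 * 1 [ZMOD p] := hc.mul hone
    _ = b0 := by ring

theorem loop_eq {a p : Int} (hp : p ≠ 0) (hg : Int.gcd a p = 1) (b0 : Int) :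
    ∀ (m X : Nat) (ca : Int), ca * a ^ X ≡ b0 [ZMOD p] →
    ((PySem.List.pyRange ((m : Int) - 1) (-1) (-1)).foldl (dlpStep a p) ((X : Int), ca)).1
      = altLoop a b0 p m (X : Int) := by
  intro m
  induction m with
  | zero =>
    intro X ca _
    rw [show ((0 : Nat) : Int) - 1 = -1 by norm_num,
        PySem.List.pyRange_neg_one_eq_nil (by norm_num)]
    simp [altLoop]
  | succ m ih =>
    intro X ca hc
    have h3pos : (0 : Int) < 3 ^ m := by positivity
    rw [show (((m + 1 : Nat)) : Int) - 1 = (m : Int) by push_cast; ring,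
        PySem.List.pyRange_neg_one_cons (by omega)]
    rw [List.foldl_cons]
    have htn : ((m : Int)).toNat = m := Int.toNat_natCast m
    have hnn : ¬ ((3:Int)^m < 0) := not_lt.mpr (le_of_lt h3pos)
    -- normalise A's head step
    have hstep : dlpStep a p ((X : Int), ca) (m : Int)
        = ((X : Int) + (if PySem.Int.mod (ca ^ 3 ^ m) p = PySem.Int.mod (a ^ (0 * 3 ^ m)) p then (0:Int)
                 else if PySem.Int.mod (ca ^ 3 ^ m) p = PySem.Int.mod (a ^ (1 * 3 ^ m)) p then 1 else 2) * 3 ^ m,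
           PySem.Int.mod (ca * pypowmod a (-((if PySem.Int.mod (ca ^ 3 ^ m) p = PySem.Int.mod (a ^ (0 * 3 ^ m)) p then (0:Int)
                 else if PySem.Int.mod (ca ^ 3 ^ m) p = PySem.Int.mod (a ^ (1 * 3 ^ m)) p then 1 else 2) * 3 ^ m)) p) p) := by
      have e1 : pypowmod ca ((3:Int) ^ m) p = PySem.Int.mod (ca ^ 3 ^ m) p := by
        rw [pypowmod_eval hp, if_neg hnn, toNat_three_pow]
      have e0 : pypowmod a (0 * (3:Int) ^ m) p = PySem.Int.mod (a ^ (0 * 3 ^ m)) p := by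
        rw [pypowmod_eval hp]; norm_num
      have e2 : pypowmod a (1 * (3:Int) ^ m) p = PySem.Int.mod (a ^ (1 * 3 ^ m)) p := by
        rw [one_mul, pypowmod_eval hp, if_neg hnn, toNat_three_pow, one_mul]
      simp only [dlpStep, htn]
      rw [e1, e0, e2]
    rw [hstep]
    -- normalise B's head step
    have eak : pypowmod a ((3:Int) ^ m) p = PySem.Int.mod (a ^ 3 ^ m) p := by
      rw [pypowmod_eval hp, if_neg hnn, toNat_three_pow]
    have et : pypowmod b0 ((3:Int) ^ m) p = PySem.Int.mod (b0 ^ 3 ^ m) p := by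
      rw [pypowmod_eval hp, if_neg hnn, toNat_three_pow]
    have eBX : pypowmod (PySem.Int.mod (a ^ 3 ^ m) p) (X : Int) p
        = PySem.Int.mod ((PySem.Int.mod (a ^ 3 ^ m) p) ^ (X + 0)) p := by
      rw [pypowmod_eval hp, if_neg (by omega), Int.toNat_natCast, Nat.add_zero]
    have eBX1 : pypowmod (PySem.Int.mod (a ^ 3 ^ m) p) ((X : Int) + 1) p
        = PySem.Int.mod ((PySem.Int.mod (a ^ 3 ^ m) p) ^ (X + 1)) p := by
      rw [pypowmod_eval hp, if_neg (by omega)]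
      congr 2
    simp only [altLoop]
    rw [eak, et, eBX, eBX1]
    -- the two digit tests correspond
    have ht0 := step_test hp hg m X hc 0
    have ht1 := step_test hp hg m X hc 1
    by_cases hc0 : PySem.Int.mod (ca ^ 3 ^ m) p = PySem.Int.mod (a ^ (0 * 3 ^ m)) p
    · -- digit 0
      rw [if_pos hc0, if_pos (ht0.mpr hc0)]
      have einv : pypowmod a (-((0:Int) * 3 ^ m)) p = PySem.Int.mod (a ^ 0) p := by
        rw [pypowmod_eval hp]
        norm_num
      have hrw : ((X:Int) + 0 * 3 ^ m) = (X:Int) := by ring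
      rw [einv, hrw]
      apply ih X
      calc PySem.Int.mod (ca * PySem.Int.mod (a ^ 0) p) p * a ^ X
            ≡ (ca * PySem.Int.mod (a ^ 0) p) * a ^ X [ZMOD p] := (pymod_modeq _ p).mul_right _
        _ ≡ (ca * a ^ 0) * a ^ X [ZMOD p] := ((pymod_modeq _ p).mul_left ca).mul_right _
        _ = ca * a ^ X := by ring
        _ ≡ b0 [ZMOD p] := hc
    · rw [if_neg hc0, if_neg (fun h => hc0 (ht0.mp h))]
      by_cases hc1 : PySem.Int.mod (ca ^ 3 ^ m) p = PySem.Int.mod (a ^ (1 * 3 ^ m)) p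
      · -- digit 1
        rw [if_pos hc1, if_pos (ht1.mpr hc1)]
        have e1 : pypowmod a (-((1:Int) * 3 ^ m)) p
            = PySem.Int.mod ((pymodinv a p) ^ (1 * 3 ^ m)) p := by
          rw [one_mul, pypowmod_eval hp, if_pos (by omega), neg_neg, toNat_three_pow, one_mul]
        have hrw : ((X:Int) + 1 * 3 ^ m) = ((X + 1 * 3 ^ m : Nat) : Int) := by push_cast; ring
        rw [e1, hrw]
        exact ih _ _ (update_inv hg m X 1 hc)
      · -- digit 2
        rw [if_neg hc1, if_neg (fun h => hc1 (ht1.mp h))]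
        have e2 : pypowmod a (-((2:Int) * 3 ^ m)) p
            = PySem.Int.mod ((pymodinv a p) ^ (2 * 3 ^ m)) p := by
          rw [pypowmod_eval hp, if_pos (by omega), neg_neg]
          have hcast : ((2:Int) * 3 ^ m) = ((2 * 3 ^ m : Nat) : Int) := by push_cast; ring
          rw [hcast, Int.toNat_natCast]
        have hrw : ((X:Int) + 2 * 3 ^ m) = ((X + 2 * 3 ^ m : Nat) : Int) := by push_cast; ring
        rw [e2, hrw]
        exact ih _ _ (update_inv hg m X 2 hc)

-- ===== VERDICT (by name: the statement is the Claim_ definition above) =====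
theorem DLP_base3_spec : Claim_equal_DLP_base3 := by
  intro a b n p _hDom hPre
  unfold Spec_DLP_base3 DLP_base3 DLP_base3_alt
  by_cases hn : n ≤ 0
  · rw [PySem.List.pyRange_neg_one_eq_nil (by omega), Int.toNat_of_nonpos hn]
    rfl
  · rcases hPre with h | ⟨hp, hg⟩
    · omega
    have hb0 : b * a ^ (0:Nat) ≡ b [ZMOD p] := by
      simp
    have := loop_eq hp hg b n.toNat 0 b hb0
    rw [Int.toNat_of_nonneg (by omega)] at this
    simpa using this
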